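-- pv_equiv track=rewrite | github.com/JMS1717/8mb.local | backend-api/app/settings_manager.py | _pick_initial_default
-- ===== SOURCE A (Python) =====
-- from typing import Any, Dict, List, Optional
--
-- def _pick_initial_default(profiles: List[Dict[str, Any]]) -> str:
--     """Pick the best initial default preset name from available profiles.
--
--     Priority: HEVC QSV > H264 QSV > HEVC VAAPI > H264 VAAPI > AV1 NVENC > HEVC NVENC > H264 NVENC > CPU > first profile.
--     """
--     codec_priority = ['hevc_qsv', 'h264_qsv', 'hevc_vaapi', 'h264_vaapi',
--                        'av1_nvenc', 'hevc_nvenc', 'h264_nvenc',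
--                        'libsvtav1', 'libx265', 'libx264']
--     for codec in codec_priority:
--         for p in profiles:
--             if p.get('video_codec') == codec:
--                 return p.get('name', 'Default')
--     if profiles:
--         return profiles[0].get('name', 'Default')
--     return 'Default'
-- ===== SOURCE B (Python) =====
-- def _pick_initial_default(profiles):
--     """Pick the best initial default preset name from available profiles.
--
--     Builds a codec -> first-matching-profile-name index in one pass,
--     then looks up the priority codecs directly.
--     """
--     codec_priority = ['hevc_qsv', 'h264_qsv', 'hevc_vaapi', 'h264_vaapi',
--                       'av1_nvenc', 'hevc_nvenc', 'h264_nvenc',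
--                       'libsvtav1', 'libx265', 'libx264']
--     by_codec = {}
--     for p in profiles:
--         c = p.get('video_codec')
--         if c is not None:
--             by_codec.setdefault(c, p.get('name', 'Default'))
--     for codec in codec_priority:
--         if codec in by_codec:
--             return by_codec[codec]
--     if profiles:
--         return profiles[0].get('name', 'Default')
--     return 'Default'
-- ===== Notes on version B (the rewrite author's own statement) =====
-- stated objective: idiomatic
-- what changed: Replaced the nested priority-by-profiles scan with one pass building a codec-to-first-profile-name dict (setdefault) followed by a direct lookup over the priority list.
import Mathlib
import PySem

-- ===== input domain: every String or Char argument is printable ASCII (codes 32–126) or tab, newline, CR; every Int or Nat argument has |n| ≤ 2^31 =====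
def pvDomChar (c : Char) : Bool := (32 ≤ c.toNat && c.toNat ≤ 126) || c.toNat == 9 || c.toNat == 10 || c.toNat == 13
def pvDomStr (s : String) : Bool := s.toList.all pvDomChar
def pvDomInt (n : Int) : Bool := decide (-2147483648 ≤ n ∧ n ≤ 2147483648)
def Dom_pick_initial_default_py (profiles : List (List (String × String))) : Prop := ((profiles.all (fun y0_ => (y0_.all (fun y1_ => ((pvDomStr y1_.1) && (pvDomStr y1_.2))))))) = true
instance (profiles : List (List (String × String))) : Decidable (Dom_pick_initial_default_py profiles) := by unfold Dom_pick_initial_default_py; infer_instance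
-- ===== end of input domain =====

-- B replaces A's nested priority×profiles scan by a one-pass codec→first-name index plus a direct lookup pass (idiomatic; same results).

-- dict.get(k) on a profile (assoc list in insertion order, first match)
def pvGet? (p : List (String × String)) (k : String) : Option String :=
  (p.find? (fun kv => kv.1 == k)).map (·.2)

-- dict.get(k, dflt)
def pvGetD (p : List (String × String)) (k dflt : String) : String :=
  (pvGet? p k).getD dflt

def pvPriorities : List String :=
  ["hevc_qsv", "h264_qsv", "hevc_vaapi", "h264_vaapi",
   "av1_nvenc", "hevc_nvenc", "h264_nvenc",
   "libsvtav1", "libx265", "libx264"]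

-- ===== PORT A =====
-- inner loop: first profile whose video_codec equals codec, returning its name
def pvFindCodecA (codec : String) : List (List (String × String)) → Option String
  | [] => none
  | p :: rest =>
      if pvGet? p "video_codec" == some codec then some (pvGetD p "name" "Default")
      else pvFindCodecA codec rest

-- outer loop over codec_priority with early return
def pvPickA (profiles : List (List (String × String))) : List String → Option String
  | [] => none
  | c :: rest =>
      match pvFindCodecA c profiles with
      | some v => some v
      | none => pvPickA profiles rest

def pick_initial_default_py (profiles : List (List (String × String))) : String :=
  match pvPickA profiles pvPriorities with
  | some v => v
  | none =>
      match profiles with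
      | [] => "Default"
      | p :: _ => pvGetD p "name" "Default"

-- ===== PORT B =====
-- one pass: by_codec.setdefault(c, p.get('name', 'Default')) keeps the FIRST profile per codec
def pvIndexB (profiles : List (List (String × String))) : PySem.Dict String String :=
  profiles.foldl
    (fun d p =>
      match pvGet? p "video_codec" with
      | none => d
      | some c => d.setdefault c (pvGetD p "name" "Default"))
    PySem.Dict.empty

-- second loop: 'if codec in by_codec: return by_codec[codec]' (contains + lookup = get?)
def pvLookupB (d : PySem.Dict String String) : List String → Option String
  | [] => none
  | c :: rest =>
      match d.get? c with
      | some v => some v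
      | none => pvLookupB d rest

def pick_initial_default_py_alt (profiles : List (List (String × String))) : String :=
  match pvLookupB (pvIndexB profiles) pvPriorities with
  | some v => v
  | none =>
      match profiles with
      | [] => "Default"
      | p :: _ => pvGetD p "name" "Default"

-- ===== PRECONDITION & SPEC =====
def Spec_pick_initial_default_py (profiles : List (List (String × String))) (out : String) : Prop := out = pick_initial_default_py_alt profiles
instance (profiles : List (List (String × String))) (out : String) : Decidable (Spec_pick_initial_default_py profiles out) := by unfold Spec_pick_initial_default_py; infer_instance

-- ===== CLAIM (what is proved, stated in full; the proofs are below) =====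
def Claim_equal_pick_initial_default_py : Prop := ∀ (profiles : List (List (String × String))), Dom_pick_initial_default_py profiles → Spec_pick_initial_default_py profiles (pick_initial_default_py profiles)

-- ===== LEMMAS AND PROOFS =====

-- the index built by B answers lookups exactly like A's inner scan
theorem pvIndexB_foldl_get? (profiles : List (List (String × String)))
    (d : PySem.Dict String String) (c : String) :
    (profiles.foldl
      (fun d p =>
        match pvGet? p "video_codec" with
        | none => d
        | some c => d.setdefault c (pvGetD p "name" "Default")) d).get? c =
    (match d.get? c with
     | some v => some v
     | none => pvFindCodecA c profiles) := by
  induction profiles generalizing d with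
  | nil => cases h : d.get? c <;> simp [pvFindCodecA, h]
  | cons p rest ih =>
    simp only [List.foldl_cons]
    rw [ih]
    cases hvc : pvGet? p "video_codec" with
    | none =>
      simp only [pvFindCodecA, hvc]
      cases h : d.get? c <;> simp
    | some c' =>
      simp only [pvFindCodecA, hvc]
      by_cases hcc : c' = c
      · subst hcc
        simp only [beq_self_eq_true, if_true]
        by_cases hcont : d.contains c' = true
        · rw [PySem.Dict.setdefault_of_contains _ _ hcont]
          rw [PySem.Dict.contains_eq_isSome_get?] at hcont
          cases h : d.get? c' with
          | none => rw [h] at hcont; simp at hcont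
          | some w => simp [h]
        · rw [PySem.Dict.setdefault_of_not_contains _ _ (by simpa using hcont)]
          rw [PySem.Dict.contains_eq_isSome_get?] at hcont
          cases h : d.get? c' with
          | some w => rw [h] at hcont; simp at hcont
          | none => simp [h, PySem.Dict.get?_insert_self]
      · have hbeq : (some c' == some c) = false := by simp [hcc]
        rw [hbeq]
        simp only [if_false, Bool.false_eq_true]
        by_cases hcont : d.contains c' = true
        · rw [PySem.Dict.setdefault_of_contains _ _ hcont]
        · rw [PySem.Dict.setdefault_of_not_contains _ _ (by simpa using hcont)]
          rw [PySem.Dict.get?_insert_of_ne _ _ (Ne.symm hcc)]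

theorem pvLookupB_eq_pickA (profiles : List (List (String × String))) (l : List String) :
    pvLookupB (pvIndexB profiles) l = pvPickA profiles l := by
  induction l with
  | nil => rfl
  | cons c rest ih =>
    simp only [pvLookupB, pvPickA, ih]
    have h := pvIndexB_foldl_get? profiles PySem.Dict.empty c
    simp only [pvIndexB, h, PySem.Dict.get?_empty]

-- ===== VERDICT (by name: the statement is the Claim_ definition above) =====
theorem pick_initial_default_py_spec : Claim_equal_pick_initial_default_py := by
  intro profiles _
  unfold Spec_pick_initial_default_py pick_initial_default_py pick_initial_default_py_alt
  rw [pvLookupB_eq_pickA]
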